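-- pv_equiv track=rewrite | github.com/csreedevi/MQAnalyser | pythonProject/mq_architecture/transform.py | _as_is_channel_links_from_demand
-- ===== SOURCE A (Python) =====
-- from typing import Dict, Iterable, List, Optional, Sequence, Tuple
--
-- def _as_is_channel_links_from_demand(demand_counts: Dict[Tuple[str, str], int]) -> List[Tuple[str, str]]:
--     # As-is assumption: if there is a demand src->dst, assume a direct channel path exists.
--     # We model that as an undirected link between src and dst.
--     links = set()
--     for (src, dst), _w in demand_counts.items():
--         if not src or not dst or src == dst:
--             continue
--         a, b = sorted([src, dst])
--         links.add((a, b))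
--     return sorted(links)
-- ===== SOURCE B (Python) =====
-- def _as_is_channel_links_from_demand(demand_counts):
--     # One pass, no set and no sort call: keep `links` sorted and duplicate-free
--     # throughout by ordered insertion (insertion sort with on-the-fly dedup).
--     links = []
--     for (src, dst), _w in demand_counts.items():
--         if not src or not dst or src == dst:
--             continue
--         p = (dst, src) if dst < src else (src, dst)
--         i = 0
--         while i < len(links) and links[i] < p:
--             i += 1
--         if i == len(links) or links[i] != p:
--             links.insert(i, p)
--     return links
-- ===== Notes on version B (the rewrite author's own statement) =====
-- stated objective: alternative
-- what changed: B drops both the hash set and the final sort: it maintains a single sorted duplicate-free list throughout, inserting each kept normalized pair at its ordered position (insertion sort with on-the-fly dedup) and skipping it when already present.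
import Mathlib
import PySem

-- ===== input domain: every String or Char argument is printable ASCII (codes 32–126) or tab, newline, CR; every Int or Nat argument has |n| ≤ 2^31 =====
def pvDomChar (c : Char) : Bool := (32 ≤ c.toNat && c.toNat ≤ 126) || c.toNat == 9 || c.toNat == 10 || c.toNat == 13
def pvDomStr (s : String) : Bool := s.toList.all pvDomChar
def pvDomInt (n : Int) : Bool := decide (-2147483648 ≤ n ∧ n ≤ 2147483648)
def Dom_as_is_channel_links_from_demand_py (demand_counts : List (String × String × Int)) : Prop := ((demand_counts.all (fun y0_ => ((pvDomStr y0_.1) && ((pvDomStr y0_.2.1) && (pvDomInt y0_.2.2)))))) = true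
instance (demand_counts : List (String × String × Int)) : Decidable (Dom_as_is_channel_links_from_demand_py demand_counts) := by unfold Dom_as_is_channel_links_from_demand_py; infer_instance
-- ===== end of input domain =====

-- B replaces A's set-plus-final-sort by one pass of ordered insertion into an always-sorted duplicate-free list (alternative decomposition; no set, no sort call).


-- ===== PORT A =====
-- links = set(); for (src,dst),_w: skip degenerate, add tuple(sorted([src,dst])); return sorted(links)
def as_is_channel_links_from_demand_py (demand_counts : List (String × String × Int)) : List (String × String) :=
  let links : PySem.Set (String × String) :=
    demand_counts.foldl (fun links x =>
      if x.1 = "" ∨ x.2.1 = "" ∨ x.1 = x.2.1 then links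
      else
        match PySem.List.sorted [x.1, x.2.1] (fun s => s) false with
        | [a, b] => PySem.Set.add links (a, b)
        | _ => links) PySem.Set.empty
  PySem.List.sorted2 links Prod.fst Prod.snd

-- ===== PORT B =====
-- the while-scan + conditional list.insert of Source B as structural recursion:
-- skip elements < p; at the first element ≥ p insert p unless equal; append at the end
def pvInsertUnique (l : List (String × String)) (p : String × String) : List (String × String) :=
  match l with
  | [] => [p]
  | q :: rest =>
    if toLex q < toLex p then q :: pvInsertUnique rest p
    else if q ≠ p then p :: q :: rest
    else q :: rest

-- links = []; for each kept normalized pair p: ordered insertion of p into links; return links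
def as_is_channel_links_from_demand_py_alt (demand_counts : List (String × String × Int)) : List (String × String) :=
  demand_counts.foldl (fun links x =>
    if x.1 = "" ∨ x.2.1 = "" ∨ x.1 = x.2.1 then links
    else pvInsertUnique links (if x.2.1 < x.1 then (x.2.1, x.1) else (x.1, x.2.1))) []

-- ===== PRECONDITION & SPEC =====
def Spec_as_is_channel_links_from_demand_py (demand_counts : List (String × String × Int)) (out : List (String × String)) : Prop := out = as_is_channel_links_from_demand_py_alt demand_counts
instance (demand_counts : List (String × String × Int)) (out : List (String × String)) : Decidable (Spec_as_is_channel_links_from_demand_py demand_counts out) := by unfold Spec_as_is_channel_links_from_demand_py; infer_instance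

-- ===== CLAIM (what is proved, stated in full; the proofs are below) =====
def Claim_equal_as_is_channel_links_from_demand_py : Prop := ∀ (demand_counts : List (String × String × Int)), Dom_as_is_channel_links_from_demand_py demand_counts → Spec_as_is_channel_links_from_demand_py demand_counts (as_is_channel_links_from_demand_py demand_counts)

-- ===== LEMMAS AND PROOFS =====

-- normalized pair (as both programs compute it)
def pvNorm (x : String × String × Int) : String × String :=
  if x.2.1 < x.1 then (x.2.1, x.1) else (x.1, x.2.1)

-- the filter both programs apply
def pvKeep (x : String × String × Int) : Bool := !decide (x.1 = "" ∨ x.2.1 = "" ∨ x.1 = x.2.1)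

-- the common multiset of kept normalized pairs
def pvM (dc : List (String × String × Int)) : List (String × String) := (dc.filter pvKeep).map pvNorm

-- Python sorted of a two-element string list
lemma pv_sorted_two (a b : String) :
    PySem.List.sorted [a, b] (fun s => s) false = if b < a then [b, a] else [a, b] := by
  simp [PySem.List.sorted, PySem.List.insertBy]

-- A's loop builds set(pvM dc)
lemma pv_foldA (dc : List (String × String × Int)) :
    ∀ s : PySem.Set (String × String),
    dc.foldl (fun links x =>
      if x.1 = "" ∨ x.2.1 = "" ∨ x.1 = x.2.1 then links
      else
        match PySem.List.sorted [x.1, x.2.1] (fun s => s) false with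
        | [a, b] => PySem.Set.add links (a, b)
        | _ => links) s
    = List.foldl PySem.Set.add s (pvM dc) := by
  induction dc with
  | nil => intro s; simp [pvM]
  | cons x rest ih =>
    intro s
    simp only [List.foldl_cons]
    have hstep : (if x.1 = "" ∨ x.2.1 = "" ∨ x.1 = x.2.1 then s
        else match PySem.List.sorted [x.1, x.2.1] (fun s => s) false with
          | [a, b] => PySem.Set.add s (a, b)
          | _ => s) = if pvKeep x then PySem.Set.add s (pvNorm x) else s := by
      by_cases h : x.1 = "" ∨ x.2.1 = "" ∨ x.1 = x.2.1
      · simp [pvKeep, h]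
      · rw [if_neg h, pv_sorted_two]
        by_cases hlt : x.2.1 < x.1 <;> simp [pvKeep, h, pvNorm, hlt]
    rw [hstep]
    by_cases hk : pvKeep x
    · rw [if_pos hk, ih]
      simp [pvM, hk]
    · rw [if_neg hk, ih]
      simp [pvM, hk]

-- B's loop is the fold of pvInsertUnique over pvM dc
lemma pv_foldB (dc : List (String × String × Int)) :
    ∀ acc : List (String × String),
    dc.foldl (fun links x =>
      if x.1 = "" ∨ x.2.1 = "" ∨ x.1 = x.2.1 then links
      else pvInsertUnique links (if x.2.1 < x.1 then (x.2.1, x.1) else (x.1, x.2.1))) acc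
    = List.foldl pvInsertUnique acc (pvM dc) := by
  induction dc with
  | nil => intro acc; simp [pvM]
  | cons x rest ih =>
    intro acc
    simp only [List.foldl_cons]
    by_cases h : x.1 = "" ∨ x.2.1 = "" ∨ x.1 = x.2.1
    · rw [if_pos h, ih]; simp [pvM, pvKeep, h]
    · rw [if_neg h, ih]
      have : (if x.2.1 < x.1 then (x.2.1, x.1) else (x.1, x.2.1)) = pvNorm x := rfl
      rw [this]
      simp [pvM, pvKeep, h]

-- membership of ordered insertion
lemma pv_insert_mem (p x : String × String) : ∀ l, x ∈ pvInsertUnique l p ↔ x = p ∨ x ∈ l := by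
  intro l
  induction l with
  | nil => simp [pvInsertUnique]
  | cons q rest ih =>
    unfold pvInsertUnique
    split_ifs with h1 h2
    · simp only [List.mem_cons, ih]; tauto
    · simp only [List.mem_cons]
    · have : q = p := not_not.mp h2
      subst this
      simp only [List.mem_cons]; tauto

-- ordered insertion keeps the list strictly sorted
lemma pv_insert_pairwise (p : String × String) : ∀ l,
    l.Pairwise (fun a b => toLex a < toLex b) →
    (pvInsertUnique l p).Pairwise (fun a b => toLex a < toLex b) := by
  intro l
  induction l with
  | nil => intro _; simp [pvInsertUnique]
  | cons q rest ih =>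
    intro hl
    obtain ⟨hq, hrest⟩ := List.pairwise_cons.mp hl
    unfold pvInsertUnique
    split_ifs with h1 h2
    · refine List.pairwise_cons.mpr ⟨?_, ih hrest⟩
      intro x hx
      rcases (pv_insert_mem p x rest).mp hx with rfl | hx
      · exact h1
      · exact hq x hx
    · have hpq : toLex p < toLex q := by
        refine lt_of_le_of_ne (not_lt.mp h1) ?_
        intro he
        exact h2 (toLex.injective he).symm
      refine List.pairwise_cons.mpr ⟨?_, hl⟩
      intro x hx
      rcases List.mem_cons.mp hx with rfl | hx
      · exact hpq
      · exact lt_trans hpq (hq x hx)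
    · have : q = p := not_not.mp h2
      subst this
      exact hl

-- folding ordered insertion: strictly sorted result, members = acc ∪ list
lemma pv_foldInsert (S : List (String × String)) : ∀ acc,
    acc.Pairwise (fun a b => toLex a < toLex b) →
    (List.foldl pvInsertUnique acc S).Pairwise (fun a b => toLex a < toLex b) ∧
      ∀ x, x ∈ List.foldl pvInsertUnique acc S ↔ x ∈ acc ∨ x ∈ S := by
  induction S with
  | nil => intro acc h; exact ⟨h, by simp⟩
  | cons p rest ih =>
    intro acc h
    simp only [List.foldl_cons]
    obtain ⟨hpw, hmem⟩ := ih (pvInsertUnique acc p) (pv_insert_pairwise p acc h)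
    refine ⟨hpw, fun x => ?_⟩
    rw [hmem x, pv_insert_mem]
    simp only [List.mem_cons]; tauto

-- sorted2 with (fst, snd) keys is sorted by the lexicographic order on pairs
lemma pv_sorted2_eq_sorted_lex (xs : List (String × String)) :
    PySem.List.sorted2 xs Prod.fst Prod.snd = PySem.List.sorted xs (fun p => toLex p) := by
  have h : (fun (a b : String × String) =>
        (decide (a.1 < b.1) || (!decide (b.1 < a.1) && decide (a.2 < b.2))))
      = (fun (a b : String × String) => decide (toLex a < toLex b)) := by
    funext a b
    have hq : (toLex a < toLex b) ↔ (a.1 < b.1 ∨ a.1 = b.1 ∧ a.2 < b.2) := Prod.Lex.lt_iff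
    by_cases h1 : a.1 < b.1
    · simp [h1, hq, not_lt_of_gt h1]
    · by_cases h2 : b.1 < a.1
      · have hne : a.1 ≠ b.1 := ne_of_gt h2
        simp [h1, h2, hq, hne]
      · have he : a.1 = b.1 := le_antisymm (not_lt.mp h2) (not_lt.mp h1)
        simp [hq, he]
  simp only [PySem.List.sorted2, PySem.List.sorted]
  rw [if_neg (by simp : ¬ (false = true)), if_neg (by simp : ¬ (false = true)), h]

-- ===== VERDICT (by name: the statement is the Claim_ definition above) =====
theorem as_is_channel_links_from_demand_py_spec : Claim_equal_as_is_channel_links_from_demand_py := by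
  intro dc _
  show as_is_channel_links_from_demand_py dc = as_is_channel_links_from_demand_py_alt dc
  unfold as_is_channel_links_from_demand_py as_is_channel_links_from_demand_py_alt
  rw [pv_foldA, pv_foldB]
  rw [pv_sorted2_eq_sorted_lex]
  have hofList : List.foldl PySem.Set.add PySem.Set.empty (pvM dc) = PySem.Set.ofList (pvM dc) := rfl
  rw [hofList]
  obtain ⟨hpw, hmem⟩ := pv_foldInsert (pvM dc) [] List.Pairwise.nil
  apply PySem.List.sorted_eq_of_perm_of_pairwise_lt
  · -- permutation with the set's distinct elements
    have hnodup1 : (List.foldl pvInsertUnique [] (pvM dc)).Nodup := by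
      refine hpw.imp ?_
      intro a b hab he
      rw [he] at hab
      exact lt_irrefl _ hab
    refine (List.perm_ext_iff_of_nodup hnodup1 (PySem.Set.nodup_ofList (pvM dc))).mpr ?_
    intro x
    rw [hmem x, PySem.Set.mem_ofList]
    simp
  · exact hpw
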